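-- pv_equiv track=rewrite | github.com/dj-lumiere/problem-solving-boj | 백준/Diamond/20940. 시철이가 사랑한 수식/시철이가 사랑한 수식.py | lcm_sum
-- ===== SOURCE A (Python) =====
-- def square_sum(N, MOD):
--     return N * (N + 1) * (2 * N + 1) // 6 % MOD
--
-- def cubic_sum(N, MOD):
--     return (N * (N + 1)) ** 2 // 4 % MOD
--
-- def quartic_sum(N, MOD):
--     return N * (N + 1) * (2 * N + 1) * (3 * N * N + 3 * N - 1) // 30 % MOD
--
-- def h2_sum(N, l, MOD):
--     return (l * square_sum(N // l - 1, MOD) + ((N // l) ** 2) * (1 + N % l)) % MOD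
--
-- def h3_sum(N, l, MOD):
--     return (l * cubic_sum(N // l - 1, MOD) + ((N // l) ** 3) * (1 + N % l)) % MOD
--
-- def h4_sum(N, l, MOD):
--     return (l * quartic_sum(N // l - 1, MOD) + ((N // l) ** 4) * (1 + N % l)) % MOD
--
-- def lcm_sum(N, MOD):
--     result = 0
--     for i in range(1, N + 1):
--         result += (
--             nu[i]
--             * (
--                 h2_sum(N, i, 4 * MOD)
--                 + 2 * h3_sum(N, i, 4 * MOD)
--                 + h4_sum(N, i, 4 * MOD)
--             )
--             // 4
--             % MOD
--         )
--     return result % MOD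
--
-- nu = [i for i in range(1000001)]
-- ===== SOURCE B (Python) =====
-- def tri_sq_sum(n):
--     # sum_{j=1}^{n} (j*(j+1)//2)**2, exact closed form
--     return n * (n + 1) * (n + 2) * (3 * n * n + 6 * n + 1) // 60
--
-- def lcm_sum(N, MOD):
--     total = 0
--     i = 1
--     while i <= N:
--         m = N // i
--         j = N // m
--         # sum of k and of k^2 for k in i..j, closed forms
--         c1 = (j * (j + 1) - (i - 1) * i) // 2
--         c2 = (j * (j + 1) * (2 * j + 1) - (i - 1) * i * (2 * i - 1)) // 6
--         t = m * (m + 1) // 2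
--         total += tri_sq_sum(m - 1) * c2 + t * t * ((N + 1) * c1 - m * c2)
--         i = j + 1
--     return total % MOD
-- ===== Notes on version B (the rewrite author's own statement) =====
-- stated objective: faster
-- what changed: B replaces A's O(N) loop (per-index modular h2/h3/h4 power-sum helpers and a precomputed weight table) by divisor blocking on N//i with exact closed-form power sums per block, taking the single modulo at the end; O(sqrt N) blocks instead of N iterations.
-- crash fix: For N > 1000000 (with MOD != 0) A raises IndexError because its weight table nu has only 1000001 entries; B computes the sum directly and returns its value (0 at the witness (1000001, 1)). — e.g. on lcm_sum(1000001, 1): A raises IndexError, B returns 0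
import Mathlib
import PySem

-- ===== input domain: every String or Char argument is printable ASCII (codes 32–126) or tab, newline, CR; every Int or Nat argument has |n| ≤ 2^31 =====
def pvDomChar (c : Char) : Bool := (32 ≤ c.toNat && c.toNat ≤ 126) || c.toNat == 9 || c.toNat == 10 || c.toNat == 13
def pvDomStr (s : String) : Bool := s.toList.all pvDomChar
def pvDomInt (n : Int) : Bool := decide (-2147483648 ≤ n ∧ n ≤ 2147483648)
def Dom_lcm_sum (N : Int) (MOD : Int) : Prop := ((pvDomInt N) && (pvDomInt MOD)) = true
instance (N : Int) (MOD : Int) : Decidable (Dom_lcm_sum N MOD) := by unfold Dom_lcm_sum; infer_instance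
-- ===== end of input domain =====

-- B replaces A's O(N) per-index loop (three modular power-sum helpers per index) by
-- divisor blocking on N//i with exact closed-form power sums per block: O(sqrt N), measurably faster.


-- ===== PORT A =====
def square_sum (N MOD : Int) : Int :=
  PySem.Int.mod (PySem.Int.floordiv (N * (N + 1) * (2 * N + 1)) 6) MOD

def cubic_sum (N MOD : Int) : Int :=
  PySem.Int.mod (PySem.Int.floordiv ((N * (N + 1)) ^ 2) 4) MOD

def quartic_sum (N MOD : Int) : Int :=
  PySem.Int.mod (PySem.Int.floordiv (N * (N + 1) * (2 * N + 1) * (3 * N * N + 3 * N - 1)) 30) MOD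

def h2_sum (N l MOD : Int) : Int :=
  PySem.Int.mod (l * square_sum (PySem.Int.floordiv N l - 1) MOD
    + (PySem.Int.floordiv N l) ^ 2 * (1 + PySem.Int.mod N l)) MOD

def h3_sum (N l MOD : Int) : Int :=
  PySem.Int.mod (l * cubic_sum (PySem.Int.floordiv N l - 1) MOD
    + (PySem.Int.floordiv N l) ^ 3 * (1 + PySem.Int.mod N l)) MOD

def h4_sum (N l MOD : Int) : Int :=
  PySem.Int.mod (l * quartic_sum (PySem.Int.floordiv N l - 1) MOD
    + (PySem.Int.floordiv N l) ^ 4 * (1 + PySem.Int.mod N l)) MOD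

def nu : List Int := PySem.List.pyRange 0 1000001

def lcm_sum (N MOD : Int) : Int :=
  PySem.Int.mod
    ((PySem.List.pyRange 1 (N + 1)).foldl
      (fun result i =>
        result + PySem.Int.mod
          (PySem.Int.floordiv
            (PySem.List.pyGetD nu i 0 *
              (h2_sum N i (4 * MOD) + 2 * h3_sum N i (4 * MOD) + h4_sum N i (4 * MOD))) 4)
          MOD)
      0)
    MOD

-- ===== PORT B =====
def tri_sq_sum (n : Int) : Int :=
  PySem.Int.floordiv (n * (n + 1) * (n + 2) * (3 * n * n + 6 * n + 1)) 60

-- the while loop only ever runs with i ≥ 1; the hypothesis carries that invariant for termination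
theorem pv_le_fdiv_fdiv {N i : Int} (h1 : 1 ≤ i) (h2 : i ≤ N) :
    i ≤ PySem.Int.floordiv N (PySem.Int.floordiv N i) := by
  have hi : (0:Int) < i := by omega
  have hm : 1 ≤ PySem.Int.floordiv N i := by
    rw [PySem.Int.le_floordiv_iff_mul_le hi]; omega
  have hmN : PySem.Int.floordiv N i * i ≤ N :=
    (PySem.Int.le_floordiv_iff_mul_le hi).mp le_rfl
  rw [PySem.Int.le_floordiv_iff_mul_le (by omega : (0:Int) < PySem.Int.floordiv N i)]
  calc i * PySem.Int.floordiv N i = PySem.Int.floordiv N i * i := by ring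
    _ ≤ N := hmN

def lcm_sum_altLoop (N : Int) (i : Int) (total : Int) (hi : 1 ≤ i) : Int :=
  if h : i ≤ N then
    let m := PySem.Int.floordiv N i
    let j := PySem.Int.floordiv N m
    let c1 := PySem.Int.floordiv (j * (j + 1) - (i - 1) * i) 2
    let c2 := PySem.Int.floordiv (j * (j + 1) * (2 * j + 1) - (i - 1) * i * (2 * i - 1)) 6
    let t := PySem.Int.floordiv (m * (m + 1)) 2
    lcm_sum_altLoop N (j + 1)
      (total + (tri_sq_sum (m - 1) * c2 + t * t * ((N + 1) * c1 - m * c2)))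
      (by simp only [j, m]; have := pv_le_fdiv_fdiv hi h; omega)
  else total
termination_by (N + 1 - i).toNat
decreasing_by
  have := pv_le_fdiv_fdiv hi h; omega

def lcm_sum_alt (N MOD : Int) : Int :=
  PySem.Int.mod (lcm_sum_altLoop N 1 0 (by norm_num)) MOD

-- ===== PRECONDITION & SPEC =====
-- Pre_ excludes exactly the inputs where the Python A raises: MOD = 0 (ZeroDivisionError in the
-- '% 4*MOD' helpers / final '% MOD') and N > 1000000 (IndexError: nu has 1000001 entries).
def Pre_lcm_sum (N : Int) (MOD : Int) : Prop := MOD ≠ 0 ∧ N ≤ 1000000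
instance (N : Int) (MOD : Int) : Decidable (Pre_lcm_sum N MOD) := by unfold Pre_lcm_sum; infer_instance

def pvWitness_lcm_sum : Int × Int := (10, 7)

-- On N > 1000000 (with MOD ≠ 0) A raises IndexError (nu has only 1000001 entries); B returns the sum's value.
def Raises_lcm_sum (N : Int) (MOD : Int) : Prop := 1000000 < N ∧ MOD ≠ 0
instance (N : Int) (MOD : Int) : Decidable (Raises_lcm_sum N MOD) := by unfold Raises_lcm_sum; infer_instance
def pvRaiseWitness_lcm_sum : Int × Int := (1000001, 1)
def pvRaiseWitnessOut_lcm_sum : Int := 0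

def Spec_lcm_sum (N : Int) (MOD : Int) (out : Int) : Prop := out = lcm_sum_alt N MOD
instance (N : Int) (MOD : Int) (out : Int) : Decidable (Spec_lcm_sum N MOD out) := by unfold Spec_lcm_sum; infer_instance

-- ===== CLAIM (what is proved, stated in full; the proofs are below) =====
def Claim_equal_lcm_sum : Prop := ∀ (N : Int) (MOD : Int), Dom_lcm_sum N MOD → Pre_lcm_sum N MOD → Spec_lcm_sum N MOD (lcm_sum N MOD)

def Claim_raises_lcm_sum : Prop := (∀ (N : Int) (MOD : Int), Dom_lcm_sum N MOD → Raises_lcm_sum N MOD → ¬ Pre_lcm_sum N MOD) ∧ (Dom_lcm_sum (pvRaiseWitness_lcm_sum.1) (pvRaiseWitness_lcm_sum.2) ∧ Raises_lcm_sum (pvRaiseWitness_lcm_sum.1) (pvRaiseWitness_lcm_sum.2) ∧ lcm_sum_alt (pvRaiseWitness_lcm_sum.1) (pvRaiseWitness_lcm_sum.2) = pvRaiseWitnessOut_lcm_sum)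

-- ===== LEMMAS AND PROOFS =====

-- exact power sums, defined by recursion on Nat
def triN : Nat → Int
  | 0 => 0
  | n+1 => triN n + ((n:Int)+1)
def ssN : Nat → Int
  | 0 => 0
  | n+1 => ssN n + ((n:Int)+1)^2
def qqN : Nat → Int
  | 0 => 0
  | n+1 => qqN n + ((n:Int)+1)^4
def tsqN : Nat → Int
  | 0 => 0
  | n+1 => tsqN n + (triN (n+1))^2

def Tz (x : Int) : Int := triN x.toNat
def Sz (x : Int) : Int := ssN x.toNat
def Qz (x : Int) : Int := tsqN x.toNat
def Uz (x : Int) : Int := qqN x.toNat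

-- the exact (integer) value of A's i-th summand before the final reductions
def eTerm (N k : Int) : Int :=
  k * (k * Qz (PySem.Int.floordiv N k - 1)
    + (Tz (PySem.Int.floordiv N k))^2 * (1 + (N - PySem.Int.floordiv N k * k)))

def eSum (N : Int) : Int := ((PySem.List.pyRange 1 (N + 1)).map (eTerm N)).sum

-- closed forms
theorem triN_closed (n : Nat) : 2 * triN n = n * (n + 1) := by
  induction n with
  | zero => simp [triN]
  | succ k ih => simp only [triN]; push_cast; push_cast at ih; ring_nf; ring_nf at ih; omega

theorem ssN_closed (n : Nat) : 6 * ssN n = n * (n + 1) * (2 * n + 1) := by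
  induction n with
  | zero => simp [ssN]
  | succ k ih => simp only [ssN]; push_cast; push_cast at ih; linear_combination ih

theorem qqN_closed (n : Nat) : 30 * qqN n = n * (n + 1) * (2 * n + 1) * (3 * n * n + 3 * n - 1) := by
  induction n with
  | zero => simp [qqN]
  | succ k ih => simp only [qqN]; push_cast; push_cast at ih; linear_combination ih

theorem tsqN_closed (n : Nat) : 60 * tsqN n = n * (n + 1) * (n + 2) * (3 * n * n + 6 * n + 1) := by
  induction n with
  | zero => simp [tsqN]
  | succ k ih =>
    have ht := triN_closed (k + 1)
    simp only [tsqN]; push_cast; push_cast at ih ht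
    linear_combination ih + (15 * (2 * triN (k+1) + ((k:Int)+1)*((k:Int)+2))) * ht

theorem combo (n : Nat) : ssN n + 2 * (triN n)^2 + qqN n = 4 * tsqN n := by
  have hss := ssN_closed n
  have hqq := qqN_closed n
  have htsq := tsqN_closed n
  have ht := triN_closed n
  push_cast at hss hqq htsq ht
  have h60 : 60 * (ssN n + 2 * (triN n)^2 + qqN n) = 60 * (4 * tsqN n) := by
    linear_combination 10 * hss + 2 * hqq - 4 * htsq + 30 * (2 * triN n + (n:Int)*((n:Int)+1)) * ht
  linarith

theorem Tz_closed {x : Int} (hx : 0 ≤ x) : 2 * Tz x = x * (x + 1) := by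
  have : x = (x.toNat : Int) := by omega
  rw [Tz, this]; exact_mod_cast triN_closed x.toNat

theorem Tz_succ {x : Int} (hx : 1 ≤ x) : Tz x = Tz (x - 1) + x := by
  have hx' : x.toNat = (x - 1).toNat + 1 := by omega
  rw [Tz, Tz, hx']
  simp only [triN]
  have h2 : (((x - 1).toNat : Int)) = x - 1 := by omega
  rw [h2]; ring

-- mod / floordiv helpers
theorem pymod_eq_of_dvd_sub {b x y : Int} (h : b ∣ x - y) :
    PySem.Int.mod x b = PySem.Int.mod y b := by
  obtain ⟨k, hk⟩ := h
  have : x = y + b * k := by omega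
  rw [this]; exact Int.add_mul_fmod_self_left y b k

theorem dvd_pymod_sub (b a : Int) : b ∣ (PySem.Int.mod a b - a) := by
  have := PySem.Int.floordiv_mul_add_mod a b
  exact ⟨-(PySem.Int.floordiv a b), by linarith [this]⟩

theorem pyfdiv_cancel_left {a : Int} (b : Int) (ha : a ≠ 0) : PySem.Int.floordiv (a * b) a = b :=
  Int.mul_fdiv_cancel_left b ha

-- more step/closed-form helpers
theorem Sz_succ {x : Int} (hx : 1 ≤ x) : Sz x = Sz (x - 1) + x^2 := by
  have hx' : x.toNat = (x - 1).toNat + 1 := by omega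
  rw [Sz, Sz, hx']
  simp only [ssN]
  have h2 : (((x - 1).toNat : Int)) = x - 1 := by omega
  rw [h2]; ring

theorem Sz_closed {x : Int} (hx : 0 ≤ x) : 6 * Sz x = x * (x + 1) * (2 * x + 1) := by
  have h : x = (x.toNat : Int) := by omega
  rw [Sz, h]; exact_mod_cast ssN_closed x.toNat

theorem Qz_closed {x : Int} (hx : 0 ≤ x) : 60 * Qz x = x * (x + 1) * (x + 2) * (3 * x * x + 6 * x + 1) := by
  have h : x = (x.toNat : Int) := by omega
  rw [Qz, h]; exact_mod_cast tsqN_closed x.toNat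

theorem Uz_closed {x : Int} (hx : 0 ≤ x) : 30 * Uz x = x * (x + 1) * (2 * x + 1) * (3 * x * x + 3 * x - 1) := by
  have h : x = (x.toNat : Int) := by omega
  rw [Uz, h]; exact_mod_cast qqN_closed x.toNat

theorem pymod_modEq (b a : Int) : Int.ModEq b (PySem.Int.mod a b) a := by
  rw [Int.modEq_iff_dvd]
  obtain ⟨k, hk⟩ := dvd_pymod_sub b a
  exact ⟨-k, by linarith⟩

theorem dvd_sum_sub {b : Int} (l : List Int) (f g : Int → Int)
    (h : ∀ x ∈ l, b ∣ (f x - g x)) : b ∣ ((l.map f).sum - (l.map g).sum) := by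
  induction l with
  | nil => simp
  | cons x t ih =>
    simp only [List.map_cons, List.sum_cons]
    have h1 := h x (by simp)
    have h2 := ih (fun y hy => h y (by simp [hy]))
    have e : f x + (t.map f).sum - (g x + (t.map g).sum)
        = (f x - g x) + ((t.map f).sum - (t.map g).sum) := by ring
    rw [e]; exact dvd_add h1 h2

-- full-range power sums
theorem sum_id_full (x : Int) (hx : 0 ≤ x) :
    ((PySem.List.pyRange 1 (x + 1)).map (fun k => k)).sum = Tz x := by
  induction x, hx using Int.le_induction with
  | base => rw [PySem.List.pyRange_one_eq_nil (by norm_num)]; simp [Tz, Int.toNat_zero, triN]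
  | succ y hy ih =>
    rw [PySem.List.pyRange_one_succ_right (by omega), List.map_append, List.sum_append,
      Tz_succ (by omega), ih]
    simp

theorem sum_sq_full (x : Int) (hx : 0 ≤ x) :
    ((PySem.List.pyRange 1 (x + 1)).map (fun k => k^2)).sum = Sz x := by
  induction x, hx using Int.le_induction with
  | base => rw [PySem.List.pyRange_one_eq_nil (by norm_num)]; simp [Sz, Int.toNat_zero, ssN]
  | succ y hy ih =>
    rw [PySem.List.pyRange_one_succ_right (by omega), List.map_append, List.sum_append,
      Sz_succ (by omega), ih]
    simp

theorem sum_id_block (i j : Int) (h1 : 1 ≤ i) (h2 : i - 1 ≤ j) :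
    ((PySem.List.pyRange i (j + 1)).map (fun k => k)).sum = Tz j - Tz (i - 1) := by
  have hsplit := PySem.List.pyRange_one_append 1 i (j + 1) (by omega) (by omega)
  have hfull := sum_id_full j (by omega)
  have hpre : ((PySem.List.pyRange 1 i).map (fun k => k)).sum = Tz (i - 1) := by
    have := sum_id_full (i - 1) (by omega)
    rw [show i - 1 + 1 = i by ring] at this
    exact this
  rw [hsplit, List.map_append, List.sum_append, hpre] at hfull
  omega

theorem sum_sq_block (i j : Int) (h1 : 1 ≤ i) (h2 : i - 1 ≤ j) :
    ((PySem.List.pyRange i (j + 1)).map (fun k => k^2)).sum = Sz j - Sz (i - 1) := by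
  have hsplit := PySem.List.pyRange_one_append 1 i (j + 1) (by omega) (by omega)
  have hfull := sum_sq_full j (by omega)
  have hpre : ((PySem.List.pyRange 1 i).map (fun k => k^2)).sum = Sz (i - 1) := by
    have := sum_sq_full (i - 1) (by omega)
    rw [show i - 1 + 1 = i by ring] at this
    exact this
  rw [hsplit, List.map_append, List.sum_append, hpre] at hfull
  omega

-- in a block [i, N//(N//i)], the quotient N//k is constant
theorem block_const {N i k : Int} (h1 : 1 ≤ i) (h2 : i ≤ N) (hk1 : i ≤ k)
    (hk2 : k ≤ PySem.Int.floordiv N (PySem.Int.floordiv N i)) :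
    PySem.Int.floordiv N k = PySem.Int.floordiv N i := by
  have hi : (0:Int) < i := by omega
  have hk : (0:Int) < k := by omega
  have hm1 : 1 ≤ PySem.Int.floordiv N i := by rw [PySem.Int.le_floordiv_iff_mul_le hi]; omega
  have hup : N < (PySem.Int.floordiv N i + 1) * i :=
    ((PySem.Int.floordiv_eq_iff_of_pos hi).mp rfl).2
  have hub : PySem.Int.floordiv N k < PySem.Int.floordiv N i + 1 := by
    rw [PySem.Int.floordiv_lt_iff_lt_mul hk]
    calc N < (PySem.Int.floordiv N i + 1) * i := hup
      _ ≤ (PySem.Int.floordiv N i + 1) * k := by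
          exact mul_le_mul_of_nonneg_left hk1 (by omega)
  have hlb : PySem.Int.floordiv N i ≤ PySem.Int.floordiv N k := by
    rw [PySem.Int.le_floordiv_iff_mul_le hk]
    have := (PySem.Int.le_floordiv_iff_mul_le (by omega : (0:Int) < PySem.Int.floordiv N i)).mp hk2
    linarith [this]
  omega

-- distributing the block sum (shape specific to B's block formula)
theorem sum_block_shape (l : List Int) (a b c m : Int) :
    (l.map (fun k => a * k^2 + b * (c * k - m * k^2))).sum
      = a * (l.map (fun k => k^2)).sum + b * (c * (l.map (fun k => k)).sum - m * (l.map (fun k => k^2)).sum) := by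
  induction l with
  | nil => simp
  | cons x t ih => simp only [List.map_cons, List.sum_cons, ih]; ring

-- A-side: each summand is congruent to eTerm mod MOD
theorem termA_cong (N MOD i : Int) (h1 : 1 ≤ i) (h2 : i ≤ N) (h3 : N ≤ 1000000) :
    MOD ∣ (PySem.Int.mod
        (PySem.Int.floordiv
          (PySem.List.pyGetD nu i 0 *
            (h2_sum N i (4 * MOD) + 2 * h3_sum N i (4 * MOD) + h4_sum N i (4 * MOD))) 4)
        MOD - eTerm N i) := by
  have hi0 : (0:Int) < i := by omega
  have hm1 : (1:Int) ≤ PySem.Int.floordiv N i := by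
    rw [PySem.Int.le_floordiv_iff_mul_le hi0]; omega
  -- nu[i] = i
  have hnu : PySem.List.pyGetD nu i 0 = i := by
    rw [PySem.List.pyGetD_of_nonneg nu 0 (by omega)]
    have hlen : nu.length = 1000001 := by
      rw [nu, PySem.List.length_pyRange_one]; rfl
    have hlt : i.toNat < nu.length := by omega
    rw [List.getD_eq_getElem _ _ hlt]
    have := PySem.List.getElem_pyRange_one 0 1000001 i.toNat (by rw [← nu]; exact hlt)
    rw [show nu[i.toNat] = (PySem.List.pyRange 0 1000001)[i.toNat]'(by rw [← nu]; exact hlt) from rfl, this]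
    omega
  rw [hnu]
  simp only [h2_sum, h3_sum, h4_sum, square_sum, cubic_sum, quartic_sum]
  set m := PySem.Int.floordiv N i with hm
  set r := PySem.Int.mod N i with hrdef
  have hr : m * i + r = N := PySem.Int.floordiv_mul_add_mod N i
  have hm0 : (0:Int) ≤ m - 1 := by omega
  have ht1 := Tz_closed (show (0:Int) ≤ m - 1 by omega)
  have htm := Tz_closed (show (0:Int) ≤ m by omega)
  rw [show m - 1 + 1 = m by ring] at ht1
  -- exact closed forms for the three floor divisions
  have e2 : (m - 1) * (m - 1 + 1) * (2 * (m - 1) + 1) = 6 * Sz (m - 1) := by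
    have := Sz_closed hm0; rw [show m - 1 + 1 = m by ring] at this ⊢; linarith
  have e3 : ((m - 1) * (m - 1 + 1)) ^ 2 = 4 * (Tz (m - 1)) ^ 2 := by
    rw [show m - 1 + 1 = m by ring]
    linear_combination (-((m - 1) * m + 2 * Tz (m - 1))) * ht1
  have e4 : (m - 1) * (m - 1 + 1) * (2 * (m - 1) + 1) * (3 * (m - 1) * (m - 1) + 3 * (m - 1) - 1)
      = 30 * Uz (m - 1) := by
    have := Uz_closed hm0; rw [show m - 1 + 1 = m by ring] at this ⊢; linarith
  rw [e4, e2, e3, pyfdiv_cancel_left _ (by norm_num : (6:Int) ≠ 0),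
    pyfdiv_cancel_left _ (by norm_num : (4:Int) ≠ 0),
    pyfdiv_cancel_left _ (by norm_num : (30:Int) ≠ 0)]
  -- the exact value of the bracket, mod 4*MOD
  have mq : ∀ a : Int, Int.ModEq (4 * MOD) (PySem.Int.mod a (4 * MOD)) a :=
    fun a => pymod_modEq (4 * MOD) a
  have hA : Int.ModEq (4 * MOD)
      (i * PySem.Int.mod (Sz (m - 1)) (4 * MOD) + m ^ 2 * (1 + r))
      (i * Sz (m - 1) + m ^ 2 * (1 + r)) :=
    Int.ModEq.add_right _ (Int.ModEq.mul_left i (mq _))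
  have hB : Int.ModEq (4 * MOD)
      (i * PySem.Int.mod ((Tz (m - 1)) ^ 2) (4 * MOD) + m ^ 3 * (1 + r))
      (i * (Tz (m - 1)) ^ 2 + m ^ 3 * (1 + r)) :=
    Int.ModEq.add_right _ (Int.ModEq.mul_left i (mq _))
  have hC : Int.ModEq (4 * MOD)
      (i * PySem.Int.mod (Uz (m - 1)) (4 * MOD) + m ^ 4 * (1 + r))
      (i * Uz (m - 1) + m ^ 4 * (1 + r)) :=
    Int.ModEq.add_right _ (Int.ModEq.mul_left i (mq _))
  have hX : Int.ModEq (4 * MOD)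
      (i * (PySem.Int.mod (i * PySem.Int.mod (Sz (m - 1)) (4 * MOD) + m ^ 2 * (1 + r)) (4 * MOD)
        + 2 * PySem.Int.mod (i * PySem.Int.mod ((Tz (m - 1)) ^ 2) (4 * MOD) + m ^ 3 * (1 + r)) (4 * MOD)
        + PySem.Int.mod (i * PySem.Int.mod (Uz (m - 1)) (4 * MOD) + m ^ 4 * (1 + r)) (4 * MOD)))
      (4 * eTerm N i) := by
    have h1 : Int.ModEq (4 * MOD)
        (PySem.Int.mod (i * PySem.Int.mod (Sz (m - 1)) (4 * MOD) + m ^ 2 * (1 + r)) (4 * MOD)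
          + 2 * PySem.Int.mod (i * PySem.Int.mod ((Tz (m - 1)) ^ 2) (4 * MOD) + m ^ 3 * (1 + r)) (4 * MOD)
          + PySem.Int.mod (i * PySem.Int.mod (Uz (m - 1)) (4 * MOD) + m ^ 4 * (1 + r)) (4 * MOD))
        ((i * Sz (m - 1) + m ^ 2 * (1 + r)) + 2 * (i * (Tz (m - 1)) ^ 2 + m ^ 3 * (1 + r))
          + (i * Uz (m - 1) + m ^ 4 * (1 + r))) :=
      (((mq _).trans hA).add (((mq _).trans hB).mul_left 2)).add ((mq _).trans hC)
    have h2 := h1.mul_left i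
    have hW : i * ((i * Sz (m - 1) + m ^ 2 * (1 + r)) + 2 * (i * (Tz (m - 1)) ^ 2 + m ^ 3 * (1 + r))
        + (i * Uz (m - 1) + m ^ 4 * (1 + r))) = 4 * eTerm N i := by
      have hcombo : Sz (m - 1) + 2 * (Tz (m - 1)) ^ 2 + Uz (m - 1) = 4 * Qz (m - 1) :=
        combo (m - 1).toNat
      rw [eTerm, ← hm, show N - m * i = r by omega]
      linear_combination (i^2) * hcombo - (i * (1 + r)) * (m * (m + 1) + 2 * Tz m) * htm
    rw [hW] at h2
    exact h2
  obtain ⟨k, hk⟩ := hX.dvd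
  have hXval : i * (PySem.Int.mod (i * PySem.Int.mod (Sz (m - 1)) (4 * MOD) + m ^ 2 * (1 + r)) (4 * MOD)
        + 2 * PySem.Int.mod (i * PySem.Int.mod ((Tz (m - 1)) ^ 2) (4 * MOD) + m ^ 3 * (1 + r)) (4 * MOD)
        + PySem.Int.mod (i * PySem.Int.mod (Uz (m - 1)) (4 * MOD) + m ^ 4 * (1 + r)) (4 * MOD))
      = 4 * (eTerm N i - MOD * k) := by linarith
  rw [hXval, pyfdiv_cancel_left _ (by norm_num : (4:Int) ≠ 0),
    pymod_eq_of_dvd_sub ⟨-k, by ring⟩]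
  exact dvd_pymod_sub MOD (eTerm N i)

theorem lcm_sum_eq_eSum (N MOD : Int) (_hM : MOD ≠ 0) (h3 : N ≤ 1000000) :
    lcm_sum N MOD = PySem.Int.mod (eSum N) MOD := by
  rw [lcm_sum, PySem.List.foldl_add, eSum]
  apply pymod_eq_of_dvd_sub
  have hd := dvd_sum_sub (b := MOD) (PySem.List.pyRange 1 (N + 1))
    (fun i => PySem.Int.mod
      (PySem.Int.floordiv
        (PySem.List.pyGetD nu i 0 *
          (h2_sum N i (4 * MOD) + 2 * h3_sum N i (4 * MOD) + h4_sum N i (4 * MOD))) 4)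
      MOD)
    (eTerm N)
    (by
      intro x hx
      rw [PySem.List.mem_pyRange_one] at hx
      exact termA_cong N MOD x hx.1 (by omega) h3)
  rw [zero_add]
  exact hd

-- B-side
theorem altLoop_eq (N i total : Int) (hi : 1 ≤ i) :
    lcm_sum_altLoop N i total hi = total + ((PySem.List.pyRange i (N + 1)).map (eTerm N)).sum := by
  fun_induction lcm_sum_altLoop N i total hi with
  | case1 i total hi h m j c1 c2 t ih =>
    rw [ih]
    have hi0 : (0:Int) < i := by omega
    have hm1 : (1:Int) ≤ m := by rw [PySem.Int.le_floordiv_iff_mul_le hi0]; omega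
    have hij : i ≤ j := pv_le_fdiv_fdiv hi h
    have hjN : j ≤ N := by
      have : j < N + 1 := by
        rw [PySem.Int.floordiv_lt_iff_lt_mul (by omega : (0:Int) < m)]
        nlinarith
      omega
    have hsplit : PySem.List.pyRange i (N + 1) = PySem.List.pyRange i (j + 1) ++ PySem.List.pyRange (j + 1) (N + 1) :=
      PySem.List.pyRange_one_append i (j + 1) (N + 1) (by omega) (by omega)
    rw [hsplit, List.map_append, List.sum_append]
    have hmap : List.map (eTerm N) (PySem.List.pyRange i (j + 1))
        = List.map (fun k => Qz (m - 1) * k^2 + (Tz m)^2 * ((N + 1) * k - m * k^2)) (PySem.List.pyRange i (j + 1)) := by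
      apply List.map_congr_left
      intro k hk
      rw [PySem.List.mem_pyRange_one] at hk
      have hfd : PySem.Int.floordiv N k = m := block_const hi h hk.1
        (by have hj2 : j = PySem.Int.floordiv N (PySem.Int.floordiv N i) := rfl; omega)
      rw [eTerm, hfd]; ring
    have hc1 : c1 = Tz j - Tz (i - 1) := by
      have a1 := Tz_closed (by omega : (0:Int) ≤ j)
      have a2 := Tz_closed (by omega : (0:Int) ≤ i - 1)
      rw [show i - 1 + 1 = i by ring] at a2
      have e : j * (j + 1) - (i - 1) * i = 2 * (Tz j - Tz (i - 1)) := by linarith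
      show PySem.Int.floordiv (j * (j + 1) - (i - 1) * i) 2 = _
      rw [e]; exact Int.mul_fdiv_cancel_left _ (by norm_num)
    have hc2 : c2 = Sz j - Sz (i - 1) := by
      have a1 := Sz_closed (by omega : (0:Int) ≤ j)
      have a2 := Sz_closed (by omega : (0:Int) ≤ i - 1)
      rw [show i - 1 + 1 = i by ring] at a2
      have e : j * (j + 1) * (2 * j + 1) - (i - 1) * i * (2 * i - 1) = 6 * (Sz j - Sz (i - 1)) := by
        ring_nf; ring_nf at a1 a2; linarith
      show PySem.Int.floordiv (j * (j + 1) * (2 * j + 1) - (i - 1) * i * (2 * i - 1)) 6 = _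
      rw [e]; exact Int.mul_fdiv_cancel_left _ (by norm_num)
    have ht : t = Tz m := by
      have a1 := Tz_closed (by omega : (0:Int) ≤ m)
      have e : m * (m + 1) = 2 * Tz m := by linarith
      show PySem.Int.floordiv (m * (m + 1)) 2 = _
      rw [e]; exact Int.mul_fdiv_cancel_left _ (by norm_num)
    have hq : tri_sq_sum (m - 1) = Qz (m - 1) := by
      have a1 := Qz_closed (by omega : (0:Int) ≤ m - 1)
      have e : (m - 1) * (m - 1 + 1) * (m - 1 + 2) * (3 * (m - 1) * (m - 1) + 6 * (m - 1) + 1)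
          = 60 * Qz (m - 1) := by linarith
      rw [tri_sq_sum, e]; exact Int.mul_fdiv_cancel_left _ (by norm_num)
    rw [hmap, sum_block_shape, sum_id_block i j (by omega) (by omega),
      sum_sq_block i j (by omega) (by omega), hc1, hc2, ht, hq]
    ring
  | case2 i total hi h =>
    rw [PySem.List.pyRange_one_eq_nil (by omega)]; simp

theorem lcm_sum_alt_eq_eSum (N MOD : Int) :
    lcm_sum_alt N MOD = PySem.Int.mod (eSum N) MOD := by
  rw [lcm_sum_alt, altLoop_eq N 1 0 (by norm_num), eSum]; norm_num

-- ===== VERDICT (by name: the statement is the Claim_ definition above) =====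
theorem lcm_sum_spec : Claim_equal_lcm_sum := by
  intro N MOD _ hPre
  unfold Spec_lcm_sum
  rw [lcm_sum_eq_eSum N MOD hPre.1 hPre.2, lcm_sum_alt_eq_eSum]

theorem lcm_sum_raises : Claim_raises_lcm_sum := by
  unfold Claim_raises_lcm_sum
  constructor
  · intro N MOD _ hR hP; exact absurd hP.2 (not_le.mpr hR.1)
  · refine ⟨by decide, by decide, ?_⟩
    show PySem.Int.mod _ 1 = 0
    exact Int.fmod_one _

-- self-check that the stated raise witness really lies in Raises_ (uses lcm_sum_raises)
theorem pvRaiseWitness_ok :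
    Raises_lcm_sum pvRaiseWitness_lcm_sum.1 pvRaiseWitness_lcm_sum.2 := by
  have h := lcm_sum_raises
  unfold Claim_raises_lcm_sum at h
  exact h.2.2.1
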